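-- pv_equiv track=rewrite | github.com/ElliottOReilly-LIN/Level_3-Project | DES_text_entry_method_and-send_bucket/stegoPI.py | chars_provider
-- ===== SOURCE A (Python) =====
-- from typing import Iterable
--
-- def chars_provider(pixel_red_values) -> Iterable[str]:
--     ascii_value = 0
--     # for each 8 bits, it yields one character
--     for i, pixel_red_value in enumerate(pixel_red_values):
--         ascii_value_bit_position = 7 - i % 8
--         if pixel_red_value & 1:
--             # Basically, turn back on the bits in the right place
--             # this will get back the character embedded
--             # if it equal to one, then left shift
--             ascii_value |= 1 << ascii_value_bit_position
--         if ascii_value_bit_position == 0: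
--             # 'cha()'' the inverse of 'ord()' returns a string 'a' from '97'
--             char: str = chr(ascii_value)
--             # just check we are returning a characters until the end
--             # otherwise, we are done and can return
--             if not char.isprintable() and char != '\n':
--                 return
--             # again, yield is generator and only needed once
--             yield char  # giving back a characters, like a return
--
--             ascii_value = 0
-- ===== SOURCE B (Python) =====
-- def chars_provider(pixel_red_values):
--     # group into complete 8-pixel chunks (incomplete trailing group dropped),
--     # build each byte in one inner pass, stop on the first unprintable non-newline char
--     for chunk in zip(*[iter(pixel_red_values)] * 8):
--         char = chr(sum(1 << (7 - j) for j, v in enumerate(chunk) if v & 1))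
--         if not char.isprintable() and char != '\n':
--             return
--         yield char
-- ===== Notes on version B (the rewrite author's own statement) =====
-- stated objective: idiomatic
-- what changed: Replaced the flat index-mod-8 bit-accumulating loop with chunking into consecutive 8-tuples and an inner per-chunk bit sum, yielding one char per complete chunk.
import Mathlib
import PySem

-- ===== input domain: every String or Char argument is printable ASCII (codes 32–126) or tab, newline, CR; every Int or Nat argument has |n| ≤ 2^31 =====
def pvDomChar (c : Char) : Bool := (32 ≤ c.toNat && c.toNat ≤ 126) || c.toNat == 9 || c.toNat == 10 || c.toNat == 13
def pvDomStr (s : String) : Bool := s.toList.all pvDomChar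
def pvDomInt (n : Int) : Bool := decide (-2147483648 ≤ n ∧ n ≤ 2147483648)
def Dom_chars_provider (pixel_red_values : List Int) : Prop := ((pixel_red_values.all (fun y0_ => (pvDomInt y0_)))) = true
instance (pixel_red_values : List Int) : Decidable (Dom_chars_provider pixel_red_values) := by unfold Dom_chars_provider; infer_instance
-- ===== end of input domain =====

-- B chunks the input into consecutive 8-tuples (dropping the incomplete trailing group, as A does)
-- and builds each byte in an inner pass — a different decomposition of A's flat index-mod-8 loop.

-- chr(b).isprintable() for a byte 0 ≤ b < 256 (exact: checked against CPython for all 256 bytes)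
def pyByteIsPrintable (b : Nat) : Bool := (32 ≤ b && b ≤ 126) || (161 ≤ b && b ≤ 255 && b != 173)

-- ===== PORT A =====
-- flat loop over the pixels; i is the enumerate index, ascii the accumulated byte (a Python int, always 0..255)
def charsA_loop : List Int → Nat → Nat → List String
  | [], _, _ => []
  | v :: rest, i, ascii =>
    let pos : Nat := 7 - i % 8
    -- Python's `if pixel_red_value & 1:` (truthiness: the AND is nonzero)
    let ascii' : Nat := if PySem.Int.band v 1 != 0 then ascii ||| (1 <<< pos) else ascii
    if pos == 0 then
      let c : Char := Char.ofNat ascii'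
      if !(pyByteIsPrintable c.toNat) && (c != '\n') then []
      else String.mk [c] :: charsA_loop rest (i + 1) 0
    else charsA_loop rest (i + 1) ascii'

def chars_provider (pixel_red_values : List Int) : List String :=
  charsA_loop pixel_red_values 0 0

-- ===== PORT B =====
-- zip(*[iter(xs)]*8): consecutive complete 8-chunks, incomplete trailing group dropped
def chunks8 : List Int → List (List Int)
  | a :: b :: c :: d :: e :: f :: g :: h :: rest => [a, b, c, d, e, f, g, h] :: chunks8 rest
  | _ => []

-- sum(1 << (7 - j) for j, v in enumerate(chunk) if v & 1); j is 0..7 in a chunk, so (7 - j).toNat is exact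
def byteOf (chunk : List Int) : Nat :=
  (PySem.List.enumerate chunk).foldl
    (fun s jv => if PySem.Int.band jv.2 1 != 0 then s + (1 <<< (7 - jv.1).toNat) else s) (0 : Nat)

def altLoop : List (List Int) → List String
  | [] => []
  | chunk :: cs =>
    let c : Char := Char.ofNat (byteOf chunk)
    if !(pyByteIsPrintable c.toNat) && (c != '\n') then []
    else String.mk [c] :: altLoop cs

def chars_provider_alt (pixel_red_values : List Int) : List String :=
  altLoop (chunks8 pixel_red_values)

-- ===== PRECONDITION & SPEC =====
def Spec_chars_provider (pixel_red_values : List Int) (out : List String) : Prop := out = chars_provider_alt pixel_red_values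
instance (pixel_red_values : List Int) (out : List String) : Decidable (Spec_chars_provider pixel_red_values out) := by unfold Spec_chars_provider; infer_instance

-- ===== CLAIM (what is proved, stated in full; the proofs are below) =====
def Claim_equal_chars_provider : Prop := ∀ (pixel_red_values : List Int), Dom_chars_provider pixel_red_values → Spec_chars_provider pixel_red_values (chars_provider pixel_red_values)

-- ===== LEMMAS AND PROOFS =====

-- one step of A's accumulation, at bit position 7 - t
def accStep (v : Int) (t ascii : Nat) : Nat :=
  if PySem.Int.band v 1 != 0 then ascii ||| (1 <<< (7 - t)) else ascii

lemma charsA_loop_cons {v : Int} {rest : List Int} {i ascii : Nat} (h : i % 8 < 7) :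
    charsA_loop (v :: rest) i ascii = charsA_loop rest (i + 1) (accStep v (i % 8) ascii) := by
  have hpos : (7 - i % 8 == 0) = false := by rw [beq_eq_false_iff_ne]; omega
  rw [charsA_loop, hpos]
  rfl

lemma charsA_loop_last {v : Int} {rest : List Int} {i ascii : Nat} (h : i % 8 = 7) :
    charsA_loop (v :: rest) i ascii =
      if !(pyByteIsPrintable (Char.ofNat (accStep v 7 ascii)).toNat)
          && (Char.ofNat (accStep v 7 ascii) != '\n') then []
      else String.mk [Char.ofNat (accStep v 7 ascii)] :: charsA_loop rest (i + 1) 0 := by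
  rw [charsA_loop, h]
  rfl

-- a trailing group shorter than the remaining bit positions never reaches position 0
lemma charsA_loop_short : ∀ (xs : List Int) (i ascii : Nat),
    xs.length ≤ 7 - i % 8 → charsA_loop xs i ascii = [] := by
  intro xs
  induction xs with
  | nil => intro i ascii _; rfl
  | cons v rest ih =>
    intro i ascii h
    simp only [List.length_cons] at h
    have h7 : i % 8 < 7 := by omega
    rw [charsA_loop_cons h7]
    apply ih
    omega

-- A's accumulated byte over one chunk equals B's per-chunk bit sum
lemma byte8 (a b c d e f g h : Int) :
    accStep h 7 (accStep g 6 (accStep f 5 (accStep e 4 (accStep d 3 (accStep c 2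
      (accStep b 1 (accStep a 0 0))))))) = byteOf [a, b, c, d, e, f, g, h] := by
  simp only [accStep, byteOf, PySem.List.enumerate, List.foldl]
  generalize (PySem.Int.band a 1 != 0) = b0
  generalize (PySem.Int.band b 1 != 0) = b1
  generalize (PySem.Int.band c 1 != 0) = b2
  generalize (PySem.Int.band d 1 != 0) = b3
  generalize (PySem.Int.band e 1 != 0) = b4
  generalize (PySem.Int.band f 1 != 0) = b5
  generalize (PySem.Int.band g 1 != 0) = b6
  generalize (PySem.Int.band h 1 != 0) = b7
  revert b0 b1 b2 b3 b4 b5 b6 b7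
  decide

lemma main_loop : ∀ (xs : List Int), ∀ (k : Nat),
    charsA_loop xs (8 * k) 0 = altLoop (chunks8 xs) := by
  intro xs
  induction xs using chunks8.induct with
  | case1 a b c d e f g h rest ih =>
    intro k
    rw [charsA_loop_cons (by omega), charsA_loop_cons (by omega), charsA_loop_cons (by omega),
        charsA_loop_cons (by omega), charsA_loop_cons (by omega), charsA_loop_cons (by omega),
        charsA_loop_cons (by omega), charsA_loop_last (by omega)]
    have e0 : 8 * k % 8 = 0 := by omega
    have e1 : (8 * k + 1) % 8 = 1 := by omega
    have e2 : (8 * k + 1 + 1) % 8 = 2 := by omega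
    have e3 : (8 * k + 1 + 1 + 1) % 8 = 3 := by omega
    have e4 : (8 * k + 1 + 1 + 1 + 1) % 8 = 4 := by omega
    have e5 : (8 * k + 1 + 1 + 1 + 1 + 1) % 8 = 5 := by omega
    have e6 : (8 * k + 1 + 1 + 1 + 1 + 1 + 1) % 8 = 6 := by omega
    rw [e0, e1, e2, e3, e4, e5, e6, byte8]
    have e8 : 8 * k + 1 + 1 + 1 + 1 + 1 + 1 + 1 + 1 = 8 * (k + 1) := by ring
    rw [e8, ih (k + 1)]
    simp only [chunks8, altLoop]
  | case2 xs h1 =>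
    intro k
    have hlen : xs.length ≤ 7 := by
      by_contra hl
      push_neg at hl
      match xs, hl with
      | a :: b :: c :: d :: e :: f :: g :: h :: rest, _ => exact h1 a b c d e f g h rest rfl
    rw [charsA_loop_short xs (8 * k) 0 (by omega)]
    have : chunks8 xs = [] := by
      match xs, hlen with
      | [], _ => rfl
      | [a], _ => rfl
      | [a,b], _ => rfl
      | [a,b,c], _ => rfl
      | [a,b,c,d], _ => rfl
      | [a,b,c,d,e], _ => rfl
      | [a,b,c,d,e,f], _ => rfl
      | [a,b,c,d,e,f,g], _ => rfl
    rw [this]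
    rfl

-- ===== VERDICT (by name: the statement is the Claim_ definition above) =====
theorem chars_provider_spec : Claim_equal_chars_provider := by
  intro xs _
  unfold Spec_chars_provider chars_provider chars_provider_alt
  have := main_loop xs 0
  simpa using this
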